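-- pv_equiv track=rewrite | github.com/joey-the-33rd/StackScout | src/ai_generators/resume_generator.py | _generate_skills
-- ===== SOURCE A (Python) =====
-- from typing import Dict, Any, List, Optional
--
-- def _generate_skills(profile: Dict[str, Any]) -> Dict[str, List[str]]:
--     """Generate skills section organized by category."""
--     skills = profile.get('skills', [])
--     categories = {
--         "Technical": [s for s in skills if any(keyword in s.lower() for keyword in ['python', 'javascript', 'java', 'react', 'node'])],
--         "Soft Skills": [s for s in skills if any(keyword in s.lower() for keyword in ['leadership', 'communication', 'teamwork'])],
--         "Tools": [s for s in skills if any(keyword in s.lower() for keyword in ['git', 'docker', 'aws', 'azure'])]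
--     }
--     return categories
-- ===== SOURCE B (Python) =====
-- _CATEGORIES = [
--     ("Technical", ['python', 'javascript', 'java', 'react', 'node']),
--     ("Soft Skills", ['leadership', 'communication', 'teamwork']),
--     ("Tools", ['git', 'docker', 'aws', 'azure']),
-- ]
--
--
-- def _generate_skills(profile):
--     """Generate skills section organized by category.
--
--     Keyword-outer strategy: for each category, sweep the keywords and mark
--     matching skills in a boolean hit vector, then gather the marked skills.
--     """
--     skills = profile.get('skills', [])
--     lows = [s.lower() for s in skills]
--     result = {}
--     for category, keywords in _CATEGORIES:
--         hit = [False] * len(skills)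
--         for kw in keywords:
--             hit = [h or (kw in low) for h, low in zip(hit, lows)]
--         result[category] = [s for s, h in zip(skills, hit) if h]
--     return result
-- ===== Notes on version B (the rewrite author's own statement) =====
-- stated objective: alternative
-- what changed: A filters the skills list per category with skill-outer comprehensions; B inverts the traversal: per category it sweeps the keywords, marking matches in a boolean hit vector over pre-lowercased skills, then gathers the marked skills in one final pass.
import Mathlib
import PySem

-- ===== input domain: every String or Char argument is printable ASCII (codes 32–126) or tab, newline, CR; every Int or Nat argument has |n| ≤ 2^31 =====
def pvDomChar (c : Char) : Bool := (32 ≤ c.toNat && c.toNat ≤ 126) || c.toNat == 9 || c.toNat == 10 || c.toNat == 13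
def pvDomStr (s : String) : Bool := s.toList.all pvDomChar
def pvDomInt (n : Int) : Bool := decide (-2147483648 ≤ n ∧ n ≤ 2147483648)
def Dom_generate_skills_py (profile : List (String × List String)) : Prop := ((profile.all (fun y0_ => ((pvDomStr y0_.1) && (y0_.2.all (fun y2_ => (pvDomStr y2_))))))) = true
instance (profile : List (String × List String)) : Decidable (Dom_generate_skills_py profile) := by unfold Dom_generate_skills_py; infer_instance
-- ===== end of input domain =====

-- B inverts A's traversal: instead of A's skill-outer comprehensions (one filter per
-- category), B sweeps each category's keywords, marking matches in a boolean hit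
-- vector over pre-lowercased skills, then gathers the marked skills; objective: alternative.

-- ===== PORT A =====
def pvTechKw : List String := ["python", "javascript", "java", "react", "node"]
def pvSoftKw : List String := ["leadership", "communication", "teamwork"]
def pvToolKw : List String := ["git", "docker", "aws", "azure"]

def generate_skills_py (profile : List (String × List String)) : List (String × List String) :=
  let skills := PySem.Dict.getD (PySem.Dict.mk profile) "skills" []
  [("Technical", skills.filter (fun s => pvTechKw.any (fun k => PySem.Str.isIn k (PySem.Str.lower s)))),
   ("Soft Skills", skills.filter (fun s => pvSoftKw.any (fun k => PySem.Str.isIn k (PySem.Str.lower s)))),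
   ("Tools", skills.filter (fun s => pvToolKw.any (fun k => PySem.Str.isIn k (PySem.Str.lower s))))]

-- ===== PORT B =====
def pvCategories : List (String × List String) :=
  [("Technical", pvTechKw), ("Soft Skills", pvSoftKw), ("Tools", pvToolKw)]

-- one keyword sweep: hit = [h or (kw in low) for h, low in zip(hit, lows)]
def pvMark (lows : List String) (hit : List Bool) (kw : String) : List Bool :=
  List.zipWith (fun h low => h || PySem.Str.isIn kw low) hit lows

-- gather pass: [s for s, h in zip(skills, hit) if h]
def pvGather (skills : List String) (hit : List Bool) : List String :=
  ((skills.zip hit).filter (fun p => p.2)).map (fun p => p.1)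

def generate_skills_py_alt (profile : List (String × List String)) : List (String × List String) :=
  let skills := PySem.Dict.getD (PySem.Dict.mk profile) "skills" []
  let lows := skills.map PySem.Str.lower
  let d := pvCategories.foldl
    (fun res ck =>
      let hit := ck.2.foldl (pvMark lows) (List.replicate skills.length false)
      PySem.Dict.insert res ck.1 (pvGather skills hit))
    (PySem.Dict.mk [])
  d.items

-- ===== PRECONDITION & SPEC =====
def Spec_generate_skills_py (profile : List (String × List String)) (out : List (String × List String)) : Prop := out = generate_skills_py_alt profile
instance (profile : List (String × List String)) (out : List (String × List String)) : Decidable (Spec_generate_skills_py profile out) := by unfold Spec_generate_skills_py; infer_instance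

-- ===== CLAIM (what is proved, stated in full; the proofs are below) =====
def Claim_equal_generate_skills_py : Prop := ∀ (profile : List (String × List String)), Dom_generate_skills_py profile → Spec_generate_skills_py profile (generate_skills_py profile)

-- ===== LEMMAS AND PROOFS =====

theorem pvZipWith_zipWith (f g : Bool → String → Bool) (hit : List Bool) (lows : List String) :
    List.zipWith f (List.zipWith g hit lows) lows
      = List.zipWith (fun h low => f (g h low) low) hit lows := by
  induction hit generalizing lows with
  | nil => simp
  | cons x xs ih => cases lows <;> simp [ih]

theorem pvZipWith_id (hit : List Bool) (lows : List String) (hlen : hit.length ≤ lows.length) :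
    List.zipWith (fun (h : Bool) (_ : String) => h) hit lows = hit := by
  induction hit generalizing lows with
  | nil => simp
  | cons x xs ih =>
    cases lows with
    | nil => simp at hlen
    | cons y ys => simp only [List.zipWith_cons_cons]; simp at hlen; simp [ih ys hlen]

-- the whole keyword sweep marks exactly "some keyword matches"
theorem pvFoldl_mark (kws : List String) (lows : List String) (hit : List Bool)
    (hlen : hit.length ≤ lows.length) :
    kws.foldl (pvMark lows) hit
      = List.zipWith (fun h low => h || kws.any (fun kw => PySem.Str.isIn kw low)) hit lows := by
  induction kws generalizing hit with
  | nil => simpa using (pvZipWith_id hit lows hlen).symm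
  | cons kw kws ih =>
    have hlen' : (pvMark lows hit kw).length ≤ lows.length := by
      simp [pvMark]
    rw [List.foldl_cons, ih _ hlen']
    simp [pvMark, pvZipWith_zipWith, Bool.or_assoc]

theorem pvZipWith_replicate (P : String → Bool) (lows : List String) :
    List.zipWith (fun (h : Bool) low => h || P low) (List.replicate lows.length false) lows
      = lows.map P := by
  induction lows with
  | nil => simp
  | cons y ys ih => simp [List.replicate_succ, ih]

theorem pvGather_map (q : String → Bool) (skills : List String) :
    pvGather skills (skills.map q) = skills.filter q := by
  induction skills with
  | nil => simp [pvGather]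
  | cons s ss ih =>
    simp only [pvGather, List.map_cons, List.zip_cons_cons, List.filter_cons] at *
    by_cases h : q s = true <;> simp [h, ih]

theorem pvSweep_eq_filter (kws skills : List String) :
    pvGather skills
      (kws.foldl (pvMark (skills.map PySem.Str.lower)) (List.replicate skills.length false))
      = skills.filter (fun s => kws.any (fun k => PySem.Str.isIn k (PySem.Str.lower s))) := by
  have h1 := pvFoldl_mark kws (skills.map PySem.Str.lower)
      (List.replicate skills.length false) (by simp)
  rw [h1]
  have h2 := pvZipWith_replicate
      (fun low => kws.any (fun kw => PySem.Str.isIn kw low)) (skills.map PySem.Str.lower)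
  simp only [List.length_map] at h2
  rw [h2, List.map_map]
  exact pvGather_map _ skills

-- ===== VERDICT (by name: the statement is the Claim_ definition above) =====
theorem generate_skills_py_spec : Claim_equal_generate_skills_py := by
  intro profile _
  show _ = _
  simp only [generate_skills_py, generate_skills_py_alt, pvCategories, List.foldl_cons,
    List.foldl_nil, pvSweep_eq_filter]
  simp [PySem.Dict.items_insert_of_not_contains, PySem.Dict.contains_insert]
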